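-- pv_equiv track=rewrite | github.com/KPOTOH/sars-cov-2 | scripts_py/calculate_distances_to_closest.py | assign_ss_types
-- ===== SOURCE A (Python) =====
-- def assign_ss_types(start, stop, paired_pos_dict):
--     """ return the type of nucleotides in ss;
--
--     type variants:
--     0: free
--     1: stem
--     2: hairpin loop
--     3: bulge loop or internal loop
--
--     @param ss_idx, int - index of one secondary cluster from output of `read_ss_file` func
--     @param nucl_idx, int - index of nucleotide in the ss
--     """
--     n = stop - start + 1
--     inside_loop = False
--     ss_types = [0] * n
--     cur_loop_stop = -1
--
--     for pos in range(n):
--         if pos in paired_pos_dict: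
--             if not inside_loop:
--                 cur_loop_stop = paired_pos_dict[pos]
--                 inside_loop = True
--
--             cur_ss_type = 1
--             last_stem_pos = pos
--         else:
--             if inside_loop:
--                 next_stem_pos = pos + 1
--                 # here we find next stem pos
--                 while next_stem_pos not in paired_pos_dict:
--                     next_stem_pos += 1
--
--                 if paired_pos_dict[last_stem_pos] == next_stem_pos:
--                     cur_ss_type = 2
--                 else:
--                     cur_ss_type = 3
--             else:
--                 cur_ss_type = 0
--
--         ss_types[pos] = cur_ss_type
--
--         if pos == cur_loop_stop:
--             inside_loop = False
--
--     return ss_types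
-- ===== SOURCE B (Python) =====
-- def assign_ss_types(start, stop, paired_pos_dict):
--     """Same result as A; the inner forward scan for the next paired position
--     is replaced by a next-paired-position array built in one backward pass."""
--     n = stop - start + 1
--     # smallest paired position >= n (the forward scan in A may run past n)
--     nk = None
--     for k in paired_pos_dict:
--         if k >= n and (nk is None or k < nk):
--             nk = k
--     # backward pass: nxt[p] = smallest paired position strictly greater than p
--     nxt = [None] * n if n > 0 else []
--     for p in range(n - 1, -1, -1):
--         nxt[p] = nk
--         if p in paired_pos_dict:
--             nk = p
--     ss_types = []
--     inside_loop = False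
--     cur_loop_stop = -1
--     last_stem_pos = -1
--     for pos in range(n):
--         if pos in paired_pos_dict:
--             if not inside_loop:
--                 cur_loop_stop = paired_pos_dict[pos]
--                 inside_loop = True
--             last_stem_pos = pos
--             ss_types.append(1)
--         elif inside_loop:
--             ss_types.append(2 if paired_pos_dict[last_stem_pos] == nxt[pos] else 3)
--         else:
--             ss_types.append(0)
--         if pos == cur_loop_stop:
--             inside_loop = False
--     return ss_types
-- ===== Notes on version B (the rewrite author's own statement) =====
-- stated objective: alternative
-- what changed: A's inner while-loop that scans forward for the next paired position is replaced by a next-paired-position array computed in one backward pass, so the classification loop does a single array lookup per position instead of a nested scan.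
-- outside the precondition, e.g. on assign_ss_types(0, 2, {0: 0}): A returns [1, 0, 0], B returns [1, 0, 0]
import Mathlib
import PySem

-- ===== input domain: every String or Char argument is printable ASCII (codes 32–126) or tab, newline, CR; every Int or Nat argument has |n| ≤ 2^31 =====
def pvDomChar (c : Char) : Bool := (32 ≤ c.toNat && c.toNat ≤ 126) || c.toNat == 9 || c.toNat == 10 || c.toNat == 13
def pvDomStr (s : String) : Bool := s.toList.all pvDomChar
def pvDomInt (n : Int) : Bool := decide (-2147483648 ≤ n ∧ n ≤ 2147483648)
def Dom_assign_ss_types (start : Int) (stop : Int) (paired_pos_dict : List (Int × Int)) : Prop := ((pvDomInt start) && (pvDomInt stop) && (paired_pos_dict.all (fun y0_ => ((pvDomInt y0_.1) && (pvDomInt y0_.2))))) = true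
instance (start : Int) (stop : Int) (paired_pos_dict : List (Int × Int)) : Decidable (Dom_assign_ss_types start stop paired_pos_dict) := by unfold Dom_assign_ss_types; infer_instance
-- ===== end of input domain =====

-- B replaces A's inner forward scan for the next paired position by a
-- next-paired-position array built in one backward pass (a different traversal of the
-- same data; not claimed faster).

-- ===== PORT A =====
-- dict lookup: paired_pos_dict.get(k); `k in paired_pos_dict` is `(pvFind d k).isSome`
def pvFind (d : List (Int × Int)) (k : Int) : Option Int :=
  (d.find? (fun kv => kv.1 == k)).map Prod.snd

-- an upper bound on all keys (used only to give the while-loop scan enough fuel)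
def pvMaxKey (d : List (Int × Int)) (m : Int) : Int :=
  d.foldl (fun acc kv => max acc kv.1) m

-- Python's `while next_stem_pos not in paired_pos_dict: next_stem_pos += 1`;
-- exact whenever a paired position ≥ p exists within fuel, which Pre_ guarantees
-- at every call site (Python's while loop diverges exactly when no such key exists).
def pvNextStem (d : List (Int × Int)) : Int → Nat → Int
  | p, 0 => p
  | p, fuel+1 => if (pvFind d p).isSome then p else pvNextStem d (p+1) fuel

-- one iteration of A's for-loop; state = (ss_types, inside_loop, cur_loop_stop, last_stem_pos)
def stepA (d : List (Int × Int)) (st : List Int × Bool × Int × Int) (pos : Int) :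
    List Int × Bool × Int × Int :=
  let r :=
    if (pvFind d pos).isSome then
      ((1 : Int), true, (if st.2.1 then st.2.2.1 else (pvFind d pos).getD 0), pos)
    else if st.2.1 then
      let ns := pvNextStem d (pos + 1) (pvMaxKey d (pos + 1) - pos).toNat
      ((if pvFind d st.2.2.2 = some ns then 2 else 3), st.2.1, st.2.2.1, st.2.2.2)
    else ((0 : Int), st.2.1, st.2.2.1, st.2.2.2)
  (st.1.set pos.toNat r.1, (if pos = r.2.2.1 then false else r.2.1), r.2.2.1, r.2.2.2)

def assign_ss_types (start : Int) (stop : Int) (paired_pos_dict : List (Int × Int)) : List Int :=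
  let n := stop - start + 1
  ((PySem.List.pyRange 0 n 1).foldl (stepA paired_pos_dict)
      (List.replicate n.toNat 0, false, -1, 0)).1

-- ===== PORT B =====
-- `nk is None or k < nk` followed by `nk = k`
def pvMinUpd (nk : Option Int) (k : Int) : Option Int :=
  match nk with
  | none => some k
  | some m => if k < m then some k else nk

-- one iteration of B's forward loop (ss_types grows by append; next stem is looked up in nxt)
def stepB (d : List (Int × Int)) (nxt : List (Option Int)) (st : List Int × Bool × Int × Int)
    (pos : Int) : List Int × Bool × Int × Int :=
  let r :=
    if (pvFind d pos).isSome then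
      ((1 : Int), true, (if st.2.1 then st.2.2.1 else (pvFind d pos).getD 0), pos)
    else if st.2.1 then
      ((if pvFind d st.2.2.2 = nxt.getD pos.toNat none then 2 else 3), st.2.1, st.2.2.1, st.2.2.2)
    else ((0 : Int), st.2.1, st.2.2.1, st.2.2.2)
  (st.1 ++ [r.1], (if pos = r.2.2.1 then false else r.2.1), r.2.2.1, r.2.2.2)

def assign_ss_types_alt (start : Int) (stop : Int) (paired_pos_dict : List (Int × Int)) : List Int :=
  let n := stop - start + 1
  -- smallest paired position ≥ n
  let nk0 := paired_pos_dict.foldl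
    (fun nk kv => if n ≤ kv.1 then pvMinUpd nk kv.1 else nk) none
  -- backward pass: nxt[p] = smallest paired position strictly greater than p
  let back := (PySem.List.pyRange (n - 1) (-1) (-1)).foldl
    (fun (st : List (Option Int) × Option Int) p =>
      (st.1.set p.toNat st.2, if (pvFind paired_pos_dict p).isSome then some p else st.2))
    (List.replicate n.toNat none, nk0)
  ((PySem.List.pyRange 0 n 1).foldl (stepB paired_pos_dict back.1) ([], false, -1, 0)).1

-- ===== PRECONDITION & SPEC =====
-- Pre_ excludes the inputs on which A's inner while-loop can run forever: some unpaired
-- position in [0, n) with a paired position before it but none after it anywhere; such a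
-- position exists iff the last position n-1 = stop-start is itself one, which is the
-- O(|dict|) condition negated here.  The condition slightly over-approximates divergence
-- (on the excluded inputs where A does terminate, A and B in fact agree).
def Pre_assign_ss_types (start : Int) (stop : Int) (paired_pos_dict : List (Int × Int)) : Prop :=
  ¬(1 ≤ stop - start ∧ pvFind paired_pos_dict (stop - start) = none ∧
    (∃ kv ∈ paired_pos_dict, 0 ≤ kv.1 ∧ kv.1 < stop - start) ∧
    ∀ kv ∈ paired_pos_dict, kv.1 ≤ stop - start)
instance (start : Int) (stop : Int) (paired_pos_dict : List (Int × Int)) : Decidable (Pre_assign_ss_types start stop paired_pos_dict) := by unfold Pre_assign_ss_types; infer_instance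

def pvWitness_assign_ss_types : Int × Int × (List (Int × Int)) := (0, 3, [(0, 3), (3, 0)])

def Spec_assign_ss_types (start : Int) (stop : Int) (paired_pos_dict : List (Int × Int)) (out : List Int) : Prop := out = assign_ss_types_alt start stop paired_pos_dict
instance (start : Int) (stop : Int) (paired_pos_dict : List (Int × Int)) (out : List Int) : Decidable (Spec_assign_ss_types start stop paired_pos_dict out) := by unfold Spec_assign_ss_types; infer_instance

-- ===== CLAIM (what is proved, stated in full; the proofs are below) =====
def Claim_equal_assign_ss_types : Prop := ∀ (start : Int) (stop : Int) (paired_pos_dict : List (Int × Int)), Dom_assign_ss_types start stop paired_pos_dict → Pre_assign_ss_types start stop paired_pos_dict → Spec_assign_ss_types start stop paired_pos_dict (assign_ss_types start stop paired_pos_dict)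

-- ===== LEMMAS AND PROOFS =====

-- the specification of "smallest paired position strictly greater than p"
def pvMK (d : List (Int × Int)) (p : Int) : Option Int :=
  ((d.map Prod.fst).filter (fun k => decide (p < k))).foldl pvMinUpd none

theorem pvFind_isSome_iff (d : List (Int × Int)) (k : Int) :
    (pvFind d k).isSome = true ↔ ∃ kv ∈ d, kv.1 = k := by
  simp [pvFind, List.find?_isSome]

theorem pvFind_eq_none_iff (d : List (Int × Int)) (k : Int) :
    pvFind d k = none ↔ ∀ kv ∈ d, kv.1 ≠ k := by
  simp [pvFind, List.find?_eq_none]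

theorem pvMinUpd_some (m k : Int) : pvMinUpd (some m) k = some (min m k) := by
  simp only [pvMinUpd, min_def]
  split_ifs <;> simp <;> omega

theorem foldl_pvMinUpd_some (xs : List Int) (m : Int) :
    xs.foldl pvMinUpd (some m) = some (xs.foldl min m) := by
  induction xs generalizing m with
  | nil => rfl
  | cons x xs ih => simp [List.foldl_cons, pvMinUpd_some, ih]

theorem foldl_min_mem (xs : List Int) (m : Int) :
    xs.foldl min m = m ∨ xs.foldl min m ∈ xs := by
  induction xs generalizing m with
  | nil => left; rfl
  | cons x xs ih =>
    rcases ih (min m x) with h | h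
    · rw [List.foldl_cons, h]
      rcases le_total m x with hx | hx
      · left; exact min_eq_left hx
      · right; simp [min_eq_right hx]
    · right; simp [List.foldl_cons, h]

theorem foldl_min_le (xs : List Int) (m : Int) :
    xs.foldl min m ≤ m ∧ ∀ b ∈ xs, xs.foldl min m ≤ b := by
  induction xs generalizing m with
  | nil => simp
  | cons x xs ih =>
    obtain ⟨h1, h2⟩ := ih (min m x)
    refine ⟨le_trans h1 (min_le_left _ _), ?_⟩
    intro b hb
    rcases List.mem_cons.mp hb with rfl | hb
    · exact le_trans h1 (min_le_right _ _)
    · exact h2 b hb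

theorem foldl_pvMinUpd_none_eq_some_iff (xs : List Int) (k : Int) :
    xs.foldl pvMinUpd none = some k ↔ k ∈ xs ∧ ∀ b ∈ xs, k ≤ b := by
  cases xs with
  | nil => simp
  | cons x xs =>
    rw [List.foldl_cons]
    show xs.foldl pvMinUpd (some x) = some k ↔ _
    rw [foldl_pvMinUpd_some]
    constructor
    · rintro h
      injection h with h
      subst h
      obtain ⟨h1, h2⟩ := foldl_min_le xs x
      refine ⟨?_, ?_⟩
      · rcases foldl_min_mem xs x with h | h
        · rw [h]; exact List.mem_cons_self
        · exact List.mem_cons_of_mem _ h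
      · intro b hb
        rcases List.mem_cons.mp hb with rfl | hb
        · exact h1
        · exact h2 b hb
    · rintro ⟨hmem, hlb⟩
      obtain ⟨h1, h2⟩ := foldl_min_le xs x
      congr 1
      have hk1 : xs.foldl min x ≤ k := by
        rcases List.mem_cons.mp hmem with rfl | hb
        · exact h1
        · exact h2 k hb
      have hk2 : k ≤ xs.foldl min x := by
        rcases foldl_min_mem xs x with h | h
        · rw [h]; exact hlb x List.mem_cons_self
        · exact hlb _ (List.mem_cons_of_mem _ h)
      omega

theorem foldl_pvMinUpd_none_eq_none_iff (xs : List Int) :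
    xs.foldl pvMinUpd none = none ↔ xs = [] := by
  cases xs with
  | nil => simp
  | cons x xs =>
    rw [List.foldl_cons]
    show xs.foldl pvMinUpd (some x) = none ↔ _
    simp [foldl_pvMinUpd_some]

theorem foldl_if_pvMinUpd (l : List (Int × Int)) (P : Int → Prop) [DecidablePred P] :
    ∀ acc, l.foldl (fun nk kv => if P kv.1 then pvMinUpd nk kv.1 else nk) acc
      = ((l.map Prod.fst).filter (fun k => decide (P k))).foldl pvMinUpd acc := by
  induction l with
  | nil => intro acc; rfl
  | cons x l ih =>
    intro acc
    by_cases h : P x.1 <;> simp [List.foldl_cons, h, ih]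

-- B's nk0 fold computes the smallest key ≥ n, i.e. the smallest key > n-1
theorem nk0_eq_pvMK (d : List (Int × Int)) (n : Int) :
    d.foldl (fun nk kv => if n ≤ kv.1 then pvMinUpd nk kv.1 else nk) none = pvMK d (n - 1) := by
  rw [foldl_if_pvMinUpd d (fun k => n ≤ k) none]
  unfold pvMK
  congr 1
  apply List.filter_congr
  intro k _
  simp only [decide_eq_decide]
  omega

theorem pvMK_eq_some_iff (d : List (Int × Int)) (p k : Int) :
    pvMK d p = some k ↔ ((p < k ∧ ∃ kv ∈ d, kv.1 = k) ∧ ∀ kv ∈ d, p < kv.1 → k ≤ kv.1) := by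
  unfold pvMK
  rw [foldl_pvMinUpd_none_eq_some_iff]
  simp only [List.mem_filter, List.mem_map, decide_eq_true_eq]
  constructor
  · rintro ⟨⟨⟨kv, hkv, rfl⟩, hpk⟩, hlb⟩
    exact ⟨⟨hpk, kv, hkv, rfl⟩, fun kv' h1 h2 => hlb kv'.1 ⟨⟨kv', h1, rfl⟩, h2⟩⟩
  · rintro ⟨⟨hpk, kv, hkv, rfl⟩, hlb⟩
    exact ⟨⟨⟨kv, hkv, rfl⟩, hpk⟩, fun b ⟨⟨kv', h1, h2⟩, h3⟩ => h2 ▸ hlb kv' h1 (h2 ▸ h3)⟩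

theorem pvMK_isSome (d : List (Int × Int)) (p : Int) (h : ∃ kv ∈ d, p < kv.1) :
    ∃ k, pvMK d p = some k := by
  cases hm : pvMK d p with
  | some k => exact ⟨k, rfl⟩
  | none =>
    exfalso
    unfold pvMK at hm
    rw [foldl_pvMinUpd_none_eq_none_iff, List.filter_eq_nil_iff] at hm
    obtain ⟨kv, hkv, hp⟩ := h
    exact hm kv.1 (List.mem_map.mpr ⟨kv, hkv, rfl⟩) (by simpa using hp)

theorem pvMK_pred (d : List (Int × Int)) (q : Int) :
    pvMK d (q - 1) = if (pvFind d q).isSome then some q else pvMK d q := by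
  split_ifs with h
  · rw [pvMK_eq_some_iff]
    obtain ⟨kv, hkv, hq⟩ := (pvFind_isSome_iff d q).mp h
    exact ⟨⟨by omega, kv, hkv, hq⟩, fun kv' _ h2 => by omega⟩
  · have hne : ∀ kv ∈ d, kv.1 ≠ q := by
      intro kv hkv hc
      exact h (by rw [pvFind_isSome_iff]; exact ⟨kv, hkv, hc⟩)
    unfold pvMK
    congr 1
    apply List.filter_congr
    intro k hk
    obtain ⟨kv, hkv, rfl⟩ := List.mem_map.mp hk
    have := hne kv hkv
    simp only [decide_eq_decide]
    omega

theorem le_pvMaxKey (d : List (Int × Int)) :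
    ∀ m, m ≤ pvMaxKey d m ∧ ∀ kv ∈ d, kv.1 ≤ pvMaxKey d m := by
  induction d with
  | nil => intro m; simp [pvMaxKey]
  | cons x d ih =>
    intro m
    obtain ⟨h1, h2⟩ := ih (max m x.1)
    refine ⟨le_trans (le_max_left _ _) h1, ?_⟩
    intro kv hkv
    rcases List.mem_cons.mp hkv with rfl | hkv
    · exact le_trans (le_max_right _ _) h1
    · exact h2 kv hkv

theorem pvNextStem_reaches (d : List (Int × Int)) (k lo : Int)
    (hkey : (pvFind d k).isSome = true)
    (hfree : ∀ j : Int, lo ≤ j → j < k → (∃ kv ∈ d, kv.1 = j) → False) :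
    ∀ (fuel : Nat) (p : Int), lo ≤ p → p ≤ k → (k - p).toNat < fuel → pvNextStem d p fuel = k := by
  intro fuel
  induction fuel with
  | zero => intro p _ _ h; omega
  | succ f ih =>
    intro p hlo hpk hfuel
    rw [pvNextStem]
    by_cases hp : (pvFind d p).isSome = true
    · have hpe : p = k := by
        by_contra hne
        have hpk' : p < k := lt_of_le_of_ne hpk hne
        exact hfree p hlo hpk' ((pvFind_isSome_iff d p).mp hp)
      subst hpe
      rw [if_pos hp]
    · simp only [hp]
      have hne : p ≠ k := fun h => hp (h ▸ hkey)
      exact ih (p + 1) (by omega) (by omega) (by omega)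

-- the fueled scan returns the minimal key above pos
theorem pvNextStem_eq (d : List (Int × Int)) (pos k : Int)
    (h : pvMK d pos = some k) :
    pvNextStem d (pos + 1) (pvMaxKey d (pos + 1) - pos).toNat = k := by
  obtain ⟨⟨hpk, kv, hkv, hkv1⟩, hlb⟩ := (pvMK_eq_some_iff d pos k).mp h
  have hkey : (pvFind d k).isSome = true := (pvFind_isSome_iff d k).mpr ⟨kv, hkv, hkv1⟩
  have hM := le_pvMaxKey d (pos + 1)
  have hkM : k ≤ pvMaxKey d (pos + 1) := hkv1 ▸ hM.2 kv hkv
  apply pvNextStem_reaches d k (pos + 1) hkey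
  · rintro j hlo hj ⟨kv', hkv', hkv'1⟩
    have := hlb kv' hkv' (by omega)
    omega
  · omega
  · omega
  · omega

-- the backward pass fills nxt[j] with pvMK d j
theorem back_go (d : List (Int × Int)) (n : Int) :
    ∀ (t : Nat) (q : Int) (arr : List (Option Int)), (q + 1).toNat = t → -1 ≤ q → q < n →
      arr.length = n.toNat →
      (((PySem.List.pyRange q (-1) (-1)).foldl
        (fun (st : List (Option Int) × Option Int) p =>
          (st.1.set p.toNat st.2, if (pvFind d p).isSome then some p else st.2))
        (arr, pvMK d q)).1.length = n.toNat) ∧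
      (∀ j : Nat, j < n.toNat →
        ((PySem.List.pyRange q (-1) (-1)).foldl
          (fun (st : List (Option Int) × Option Int) p =>
            (st.1.set p.toNat st.2, if (pvFind d p).isSome then some p else st.2))
          (arr, pvMK d q)).1.getD j none
          = if (j : Int) ≤ q then pvMK d j else arr.getD j none) := by
  intro t
  induction t with
  | zero =>
    intro q arr ht h1 h2 h3
    have hq : q = -1 := by omega
    subst hq
    rw [PySem.List.pyRange_neg_one_eq_nil (by omega)]
    refine ⟨h3, ?_⟩
    intro j hj
    rw [if_neg (by omega)]
    rfl
  | succ t ih =>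
    intro q arr ht h1 h2 h3
    have hq0 : 0 ≤ q := by omega
    rw [PySem.List.pyRange_neg_one_cons (by omega : (-1 : Int) < q)]
    rw [List.foldl_cons]
    have hstep :
        ((arr.set q.toNat (pvMK d q), if (pvFind d q).isSome then some q else pvMK d q)
          : List (Option Int) × Option Int)
        = (arr.set q.toNat (pvMK d q), pvMK d (q - 1)) := by
      rw [← pvMK_pred]
    rw [hstep]
    obtain ⟨ihl, ihd⟩ := ih (q - 1) (arr.set q.toNat (pvMK d q)) (by omega) (by omega)
      (by omega) (by rw [List.length_set]; exact h3)
    refine ⟨ihl, ?_⟩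
    intro j hj
    rw [ihd j hj]
    by_cases hle : (j : Int) ≤ q - 1
    · rw [if_pos hle, if_pos (by omega)]
    · rw [if_neg hle]
      by_cases heq : (j : Int) = q
      · rw [if_pos (by omega)]
        have hqn : q.toNat = j := by omega
        rw [List.getD_eq_getElem?_getD, List.getElem?_set, if_pos hqn,
          if_pos (by omega : q.toNat < arr.length)]
        simp [show q = (j : Int) from heq.symm]
      · rw [if_neg (by omega)]
        rw [List.getD_eq_getElem?_getD, List.getElem?_set,
          if_neg (by omega : ¬ q.toNat = j), ← List.getD_eq_getElem?_getD]

-- Pre_ gives the pointwise guarantee the main induction needs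
theorem pre_pointwise (start stop : Int) (d : List (Int × Int))
    (hpre : Pre_assign_ss_types start stop d) :
    ∀ p ∈ PySem.List.pyRange 0 (stop - start + 1) 1, pvFind d p = none →
      (∃ kv ∈ d, 0 ≤ kv.1 ∧ kv.1 < p) → ∃ kv ∈ d, p < kv.1 := by
  intro p hp hnone hbef
  rw [PySem.List.mem_pyRange_one] at hp
  by_contra hno
  push Not at hno
  obtain ⟨kv, hkv, hkv0, hkvp⟩ := hbef
  apply hpre
  refine ⟨by omega, ?_, ⟨kv, hkv, hkv0, ?_⟩, ?_⟩
  · rw [pvFind_eq_none_iff]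
    intro kv' hkv' hc
    have h1 := hno kv' hkv'
    have hps : p = stop - start := by omega
    rw [pvFind_eq_none_iff] at hnone
    exact hnone kv' hkv' (by omega)
  · have := hno kv hkv
    by_cases hps : p = stop - start
    · omega
    · omega
  · intro kv' hkv'
    have := hno kv' hkv'
    omega

theorem set_append_replicate (ssB : List Int) (m : Nat) (t : Int) (hm : 0 < m) :
    (ssB ++ List.replicate m (0 : Int)).set ssB.length t
      = (ssB ++ [t]) ++ List.replicate (m - 1) (0 : Int) := by
  rw [List.set_append, if_neg (by omega)]
  obtain ⟨m', rfl⟩ : ∃ m', m = m' + 1 := ⟨m - 1, by omega⟩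
  simp [List.replicate_succ]

-- main induction: from length-related states, the two forward loops build the same list
theorem main_go (d : List (Int × Int)) (n : Int) (nxt : List (Option Int))
    (hnxt : ∀ j : Int, 0 ≤ j → j < n → nxt.getD j.toNat none = pvMK d j)
    (hpre : ∀ p ∈ PySem.List.pyRange 0 n 1, pvFind d p = none →
      (∃ kv ∈ d, 0 ≤ kv.1 ∧ kv.1 < p) → ∃ kv ∈ d, p < kv.1) :
    ∀ (t : Nat) (p : Int) (ssB : List Int) (inside : Bool) (curStop lastStem : Int),
      (n - p).toNat = t → 0 ≤ p → p ≤ n → ssB.length = p.toNat →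
      (inside = true → ∃ kv ∈ d, 0 ≤ kv.1 ∧ kv.1 < p) →
      ((PySem.List.pyRange p n 1).foldl (stepA d)
        (ssB ++ List.replicate (n - p).toNat 0, inside, curStop, lastStem)).1
      = ((PySem.List.pyRange p n 1).foldl (stepB d nxt)
        (ssB, inside, curStop, lastStem)).1 := by
  intro t
  induction t with
  | zero =>
    intro p ssB inside curStop lastStem ht h0 hn hlen hinv
    rw [PySem.List.pyRange_one_eq_nil (by omega)]
    simp only [List.foldl_nil]
    rw [show (n - p).toNat = 0 from ht]
    simp
  | succ t ih =>
    intro p ssB inside curStop lastStem ht h0 hn hlen hinv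
    have hpn : p < n := by omega
    rw [PySem.List.pyRange_one_cons hpn]
    simp only [List.foldl_cons]
    by_cases hkey : (pvFind d p).isSome = true
    · -- paired position: both write 1, open if needed
      have hsetA : ((ssB ++ List.replicate (n - p).toNat 0).set p.toNat 1)
          = (ssB ++ [1]) ++ List.replicate (n - (p + 1)).toNat (0 : Int) := by
        rw [← hlen, set_append_replicate ssB _ 1 (by omega),
          show (n - p).toNat - 1 = (n - (p + 1)).toNat by omega]
      simp only [stepA, stepB, hkey, if_true]
      rw [hsetA]
      exact ih (p + 1) (ssB ++ [1]) _ _ _ (by omega) (by omega) (by omega)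
        (by simp only [List.length_append, List.length_cons, List.length_nil, hlen]; omega)
        (by
          intro _
          obtain ⟨kv, hkv, hkv1⟩ := (pvFind_isSome_iff d p).mp hkey
          exact ⟨kv, hkv, by omega, by omega⟩)
    · by_cases hin : inside = true
      · -- inside a loop, unpaired: 2/3 via the next stem position
        have hnone : pvFind d p = none := Option.not_isSome_iff_eq_none.mp hkey
        obtain ⟨k, hk⟩ := pvMK_isSome d p
          (hpre p (by rw [PySem.List.mem_pyRange_one]; omega) hnone
            (by
              obtain ⟨kv, hkv, hkv1, hkv2⟩ := hinv hin
              exact ⟨kv, hkv, hkv1, hkv2⟩))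
        have hns := pvNextStem_eq d p k hk
        have hlook : nxt.getD p.toNat none = some k := by rw [hnxt p h0 hpn, hk]
        have hkeyb : (pvFind d p).isSome = false := by simpa using hkey
        simp only [stepA, stepB, hkeyb, Bool.false_eq_true, if_false, hin, if_true, hns, hlook]
        have hsetA : ((ssB ++ List.replicate (n - p).toNat 0).set p.toNat
            (if pvFind d lastStem = some k then 2 else 3))
            = (ssB ++ [if pvFind d lastStem = some k then 2 else 3])
              ++ List.replicate (n - (p + 1)).toNat (0 : Int) := by
          rw [← hlen, set_append_replicate ssB _ _ (by omega),
            show (n - p).toNat - 1 = (n - (p + 1)).toNat by omega]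
        rw [hsetA]
        exact ih (p + 1) _ _ _ _ (by omega) (by omega) (by omega)
          (by simp only [List.length_append, List.length_cons, List.length_nil, hlen]; omega)
          (by
            intro hins
            obtain ⟨kv, hkv, hkv1, hkv2⟩ := hinv hin
            exact ⟨kv, hkv, hkv1, by omega⟩)
      · -- free position
        have hinf : inside = false := by simpa using hin
        have hkeyb : (pvFind d p).isSome = false := by simpa using hkey
        simp only [stepA, stepB, hkeyb, hinf, Bool.false_eq_true, if_false]
        have hsetA : ((ssB ++ List.replicate (n - p).toNat 0).set p.toNat 0)
            = (ssB ++ [0]) ++ List.replicate (n - (p + 1)).toNat (0 : Int) := by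
          rw [← hlen, set_append_replicate ssB _ 0 (by omega),
            show (n - p).toNat - 1 = (n - (p + 1)).toNat by omega]
        rw [hsetA]
        exact ih (p + 1) _ _ _ _ (by omega) (by omega) (by omega)
          (by simp only [List.length_append, List.length_cons, List.length_nil, hlen]; omega)
          (by intro h; simp at h)

-- ===== VERDICT (by name: the statement is the Claim_ definition above) =====
theorem assign_ss_types_spec : Claim_equal_assign_ss_types := by
  unfold Claim_equal_assign_ss_types
  intro start stop d _ hpre
  unfold Spec_assign_ss_types assign_ss_types assign_ss_types_alt
  have hpre' := pre_pointwise start stop d hpre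
  dsimp only
  by_cases hn : stop - start + 1 ≤ 0
  · rw [PySem.List.pyRange_one_eq_nil hn]
    simp only [List.foldl_nil]
    simp [Int.toNat_of_nonpos hn]
  · have hn1 : 1 ≤ stop - start + 1 := by omega
    rw [nk0_eq_pvMK d (stop - start + 1)]
    obtain ⟨hbl, hbd⟩ := back_go d (stop - start + 1) (stop - start + 1 - 1 + 1).toNat
      (stop - start + 1 - 1) (List.replicate (stop - start + 1).toNat none) rfl
      (by omega) (by omega) (by rw [List.length_replicate])
    have hnxt : ∀ j : Int, 0 ≤ j → j < stop - start + 1 →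
        ((PySem.List.pyRange (stop - start + 1 - 1) (-1) (-1)).foldl
          (fun (st : List (Option Int) × Option Int) p =>
            (st.1.set p.toNat st.2, if (pvFind d p).isSome then some p else st.2))
          (List.replicate (stop - start + 1).toNat none,
            pvMK d (stop - start + 1 - 1))).1.getD j.toNat none = pvMK d j := by
      intro j hj0 hjn
      rw [hbd j.toNat (by omega)]
      rw [if_pos (by omega)]
      congr 1
      omega
    have := main_go d (stop - start + 1) _ hnxt hpre' (stop - start + 1 - 0).toNat 0 [] false
      (-1) 0 rfl (by omega) (by omega) rfl (by intro h; simp at h)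
    simpa using this
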